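-- pv_equiv track=rewrite | github.com/AzulCastroviejo/Python | Modelo_examen.py | orden_suma
-- ===== SOURCE A (Python) =====
-- def orden_suma(matriz_suma):
--
--         matriz_ordenada = [] # Creamos una matriz nueva que tendra la matriz_suma y sus indices
--         for i in range(len(matriz_suma)):#inicializamos el for de i hasta el rango de largo de la matriz_suma
--             fila_actual =[]
--             for j in range(0,1):
--                num= matriz_suma[i]
--                fila_actual.append([num , i])
--
--             matriz_ordenada.append(fila_actual)
--
--         suma_con_indices = sorted(matriz_ordenada, reverse=True)
--
--         return suma_con_indices
-- ===== SOURCE B (Python) =====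
-- def orden_suma(matriz_suma):
--     # Bucket the indices by value, then emit groups: distinct values sorted
--     # descending, and within each value its indices in descending order
--     # (that is exactly the descending (value, index) order A's list-sort gives).
--     grupos = {}
--     for i, v in enumerate(matriz_suma):
--         grupos.setdefault(v, []).append(i)
--     resultado = []
--     for v in sorted(grupos, reverse=True):
--         for i in reversed(grupos[v]):
--             resultado.append([[v, i]])
--     return resultado
-- ===== Notes on version B (the rewrite author's own statement) =====
-- stated objective: alternative
-- what changed: B buckets the indices by value in a dict, sorts only the distinct values descending, and emits each bucket's indices in reverse, instead of A's decorate-into-nested-singleton-lists then sort-by-default-list-comparison; ties are handled by construction rather than by comparison.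
import Mathlib
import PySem

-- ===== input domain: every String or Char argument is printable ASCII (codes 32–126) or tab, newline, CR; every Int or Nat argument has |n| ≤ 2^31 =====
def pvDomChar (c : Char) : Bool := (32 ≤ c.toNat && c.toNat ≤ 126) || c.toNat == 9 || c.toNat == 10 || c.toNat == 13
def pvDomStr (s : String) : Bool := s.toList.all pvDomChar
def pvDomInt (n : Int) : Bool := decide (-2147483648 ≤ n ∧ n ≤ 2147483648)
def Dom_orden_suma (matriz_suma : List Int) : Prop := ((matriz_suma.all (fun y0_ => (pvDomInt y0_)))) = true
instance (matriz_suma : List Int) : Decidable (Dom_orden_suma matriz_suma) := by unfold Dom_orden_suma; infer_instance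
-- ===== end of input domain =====

-- B buckets indices by value in a dict and emits the buckets in descending value /
-- descending index order, instead of A's decorate-then-sort-nested-lists; objective: alternative.

-- ===== PORT A =====
def orden_suma (matriz_suma : List Int) : List (List (List Int)) :=
  let matriz_ordenada :=
    (PySem.List.pyRange 0 (matriz_suma.length : Int) 1).foldl (fun acc i =>
      let fila_actual :=
        (PySem.List.pyRange 0 1 1).foldl (fun fila _j =>
          -- matriz_suma[i]: i ranges over range(len(matriz_suma)), so the index is always valid
          let num := PySem.List.pyGetD matriz_suma i 0
          fila ++ [[num, i]]) ([] : List (List Int))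
      acc ++ [fila_actual]) ([] : List (List (List Int)))
  PySem.List.sorted matriz_ordenada (fun x => x) true

-- ===== PORT B =====
def orden_suma_alt (matriz_suma : List Int) : List (List (List Int)) :=
  -- grupos.setdefault(v, []).append(i) mutates the bucket in place: ported as
  -- modify v [] (· ++ [i]) (exact: appends i to the existing-or-empty bucket of v)
  let grupos := (PySem.List.enumerate matriz_suma 0).foldl
      (fun d p => d.modify p.2 ([] : List Int) (fun l => l ++ [p.1])) PySem.Dict.empty
  let resultado :=
    (PySem.List.sorted grupos.keys (fun v => v) true).foldl (fun res v =>
      (grupos.getD v []).reverse.foldl (fun res i => res ++ [[[v, i]]]) res)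
      ([] : List (List (List Int)))
  resultado

-- ===== PRECONDITION & SPEC =====
def Spec_orden_suma (matriz_suma : List Int) (out : List (List (List Int))) : Prop := out = orden_suma_alt matriz_suma
instance (matriz_suma : List Int) (out : List (List (List Int))) : Decidable (Spec_orden_suma matriz_suma out) := by unfold Spec_orden_suma; infer_instance

-- ===== CLAIM (what is proved, stated in full; the proofs are below) =====
def Claim_equal_orden_suma : Prop := ∀ (matriz_suma : List Int), Dom_orden_suma matriz_suma → Spec_orden_suma matriz_suma (orden_suma matriz_suma)

-- ===== LEMMAS AND PROOFS =====

-- proof-only abbreviations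
def pvIdx (xs : List Int) (v : Int) : List Int :=
  ((PySem.List.enumerate xs 0).filter (fun p => p.2 == v)).map (·.1)

def pvRows (xs : List Int) : List (List (List Int)) :=
  (List.range xs.length).map (fun k => [[xs.getD k 0, (k : Int)]])

def pvOut (xs : List Int) : List (List (List Int)) :=
  (PySem.List.sorted (PySem.Set.ofList xs) (fun v => v) true).flatMap
    (fun v => (pvIdx xs v).reverse.map (fun i => [[v, i]]))

-- Python's list comparison on a decorated row [[v, i]] is lexicographic on (v, i).
theorem pv_row_lt_iff (va a vb b : Int) :
    (([[va, a]] : List (List Int)) < [[vb, b]]) ↔ (va < vb ∨ (va = vb ∧ a < b)) := by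
  simp [List.cons_lt_cons_iff]

-- A's port computes sorted(pvRows, reverse=True).
theorem pv_A_eq (xs : List Int) :
    orden_suma xs = PySem.List.sorted (pvRows xs) (fun x => x) true := by
  unfold orden_suma pvRows
  have hrange : PySem.List.pyRange 0 1 1 = [0] := by decide
  simp only [hrange, List.foldl_cons, List.foldl_nil, List.nil_append,
    PySem.List.foldl_append_singleton_eq_map, PySem.List.pyRange_zero_natCast,
    List.map_map]
  congr 1
  apply List.map_congr_left
  intro k hk
  simp [PySem.List.pyGetD_natCast]

-- B's dict lookup is the bucket of v: the indices whose value is v, in order.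
theorem pv_group_eq (xs : List Int) (v : Int) :
    ((PySem.List.enumerate xs 0).foldl
        (fun d p => d.modify p.2 ([] : List Int) (fun l => l ++ [p.1]))
        PySem.Dict.empty).getD v [] = pvIdx xs v := by
  have h : (PySem.List.enumerate xs 0).foldl
      (fun d p => d.modify p.2 ([] : List Int) (fun l => l ++ [p.1])) PySem.Dict.empty
      = ((PySem.List.enumerate xs 0).map Prod.swap).foldl
          (fun d q => d.modify q.1 ([] : List Int) (fun l => l ++ [q.2])) PySem.Dict.empty := by
    rw [List.foldl_map]
    rfl
  rw [h, PySem.Dict.getD_foldl_modify_append]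
  unfold pvIdx
  simp [List.filter_map, List.map_map, Function.comp_def, Prod.swap]

-- B's dict keys are set(xs).
theorem pv_keys_eq (xs : List Int) :
    ((PySem.List.enumerate xs 0).foldl
        (fun d p => d.modify p.2 ([] : List Int) (fun l => l ++ [p.1]))
        PySem.Dict.empty).keys = PySem.Set.ofList xs := by
  have := PySem.Dict.keys_foldl_modify_key (PySem.List.enumerate xs 0) (fun p => p.2)
      ([] : List Int) (fun _ p l => l ++ [p.1]) PySem.Dict.empty
  simp only [PySem.Dict.keys_empty] at this
  rw [this, PySem.Set.update_nil_left]
  congr 1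
  exact PySem.List.map_snd_enumerate xs 0

-- B's port computes pvOut.
theorem pv_B_eq (xs : List Int) : orden_suma_alt xs = pvOut xs := by
  unfold orden_suma_alt pvOut
  simp only [pv_keys_eq, pv_group_eq]
  have hbody : ∀ (res : List (List (List Int))) (v : Int),
      (pvIdx xs v).reverse.foldl (fun res i => res ++ [[[v, i]]]) res
        = res ++ (pvIdx xs v).reverse.map (fun i => [[v, i]]) :=
    fun res v => PySem.List.foldl_append_singleton_eq_map _ _ _
  calc (PySem.List.sorted (PySem.Set.ofList xs) (fun v => v) true).foldl
        (fun res v => (pvIdx xs v).reverse.foldl (fun res i => res ++ [[[v, i]]]) res) []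
      = (PySem.List.sorted (PySem.Set.ofList xs) (fun v => v) true).foldl
        (fun res v => res ++ (pvIdx xs v).reverse.map (fun i => [[v, i]])) [] := by
        exact List.foldl_ext _ _ _ (fun a b _ => hbody a b)
    _ = _ := by
        rw [PySem.List.foldl_append_eq_flatMap]
        simp

-- membership in a bucket
theorem pv_mem_pvIdx (xs : List Int) (v i : Int) :
    i ∈ pvIdx xs v ↔ ∃ (k : Nat) (h : k < xs.length), i = (k : Int) ∧ xs[k] = v := by
  unfold pvIdx
  simp only [List.mem_map, List.mem_filter]
  constructor
  · rintro ⟨p, ⟨hp, hv⟩, rfl⟩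
    rcases (PySem.List.mem_enumerate_iff xs 0 p).mp hp with ⟨k, h, rfl⟩
    exact ⟨k, h, by simpa using (beq_iff_eq.mp hv)⟩
  · rintro ⟨k, h, rfl, hv⟩
    exact ⟨((k : Int), xs[k]), ⟨(PySem.List.mem_enumerate_iff xs 0 _).mpr ⟨k, h, by simp⟩,
      by simpa using hv⟩, rfl⟩

-- bucket indices are strictly increasing
theorem pv_pairwise_pvIdx (xs : List Int) (v : Int) :
    (pvIdx xs v).Pairwise (· < ·) := by
  unfold pvIdx
  refine List.Pairwise.map _ (fun p q h => h) ?_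
  exact (PySem.List.pairwise_lt_enumerate xs 0).sublist List.filter_sublist

-- membership in pvRows
theorem pv_mem_pvRows (xs : List Int) (x : List (List Int)) :
    x ∈ pvRows xs ↔ ∃ (k : Nat) (h : k < xs.length), x = [[xs[k], (k : Int)]] := by
  unfold pvRows
  simp only [List.mem_map, List.mem_range]
  constructor
  · rintro ⟨k, hk, rfl⟩
    exact ⟨k, hk, by rw [List.getD_eq_getElem _ _ hk]⟩
  · rintro ⟨k, hk, rfl⟩
    exact ⟨k, hk, by rw [List.getD_eq_getElem _ _ hk]⟩

-- membership in pvOut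
theorem pv_mem_pvOut (xs : List Int) (x : List (List Int)) :
    x ∈ pvOut xs ↔ ∃ (k : Nat) (h : k < xs.length), x = [[xs[k], (k : Int)]] := by
  unfold pvOut
  simp only [List.mem_flatMap, PySem.List.mem_sorted, PySem.Set.mem_ofList,
    List.mem_map, List.mem_reverse]
  constructor
  · rintro ⟨v, _, i, hi, rfl⟩
    rcases (pv_mem_pvIdx xs v i).mp hi with ⟨k, h, rfl, rfl⟩
    exact ⟨k, h, rfl⟩
  · rintro ⟨k, h, rfl⟩
    exact ⟨xs[k], List.getElem_mem h, (k : Int),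
      (pv_mem_pvIdx xs _ _).mpr ⟨k, h, rfl, rfl⟩, rfl⟩

theorem pv_nodup_pvRows (xs : List Int) : (pvRows xs).Nodup := by
  unfold pvRows
  refine (List.nodup_range).map_on ?_
  intro a _ b _ hab
  have h2 : ((a : Int)) = (b : Int) := by
    simpa using congrArg (fun l => (l.getD 0 []).getD 1 0) hab
  exact_mod_cast h2

theorem pv_nodup_pvOut (xs : List Int) : (pvOut xs).Nodup := by
  unfold pvOut
  rw [List.nodup_flatMap]
  constructor
  · intro v _
    refine List.Nodup.map ?_ (List.nodup_reverse.mpr ((pv_pairwise_pvIdx xs v).imp (fun h => ne_of_lt h)))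
    intro a b h
    simpa using congrArg (fun l => (l.getD 0 []).getD 1 0) h
  · have hnd : (PySem.List.sorted (PySem.Set.ofList xs) (fun v => v) true).Nodup :=
      (PySem.List.sorted_perm _ _ _).nodup_iff.mpr (PySem.Set.nodup_ofList xs)
    refine hnd.imp ?_
    intro v w hvw
    intro x hx hy
    simp only [List.mem_map, List.mem_reverse] at hx hy
    rcases hx with ⟨i, _, rfl⟩
    rcases hy with ⟨j, _, h⟩
    apply hvw
    simpa using (congrArg (fun l => (l.getD 0 []).getD 0 0) h).symm

-- the sorted-keys list is strictly decreasing
theorem pv_keys_sorted_gt (xs : List Int) :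
    (PySem.List.sorted (PySem.Set.ofList xs) (fun v => v) true).Pairwise (· > ·) := by
  have h1 := PySem.List.sorted_pairwise_rev (PySem.Set.ofList xs) (fun v => v)
  have h2 : (PySem.List.sorted (PySem.Set.ofList xs) (fun v => v) true).Nodup :=
    (PySem.List.sorted_perm _ _ _).nodup_iff.mpr (PySem.Set.nodup_ofList xs)
  exact (h1.and h2).imp (fun ⟨hle, hne⟩ => lt_of_le_of_ne hle (Ne.symm hne))

-- pvOut is strictly decreasing in Python's list order
theorem pv_pairwise_pvOut (xs : List Int) :
    (pvOut xs).Pairwise (fun a b => b < a) := by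
  unfold pvOut
  rw [List.pairwise_flatMap]
  constructor
  · intro v _
    have : (pvIdx xs v).reverse.Pairwise (· > ·) := (pv_pairwise_pvIdx xs v).reverse
    refine this.map _ ?_
    intro a b hab
    exact (pv_row_lt_iff v b v a).mpr (Or.inr ⟨rfl, hab⟩)
  · refine (pv_keys_sorted_gt xs).imp ?_
    intro v w hvw x hx y hy
    simp only [List.mem_map, List.mem_reverse] at hx hy
    rcases hx with ⟨i, _, rfl⟩
    rcases hy with ⟨j, _, rfl⟩
    exact (pv_row_lt_iff w j v i).mpr (Or.inl hvw)

theorem pv_perm (xs : List Int) : (pvOut xs).Perm (pvRows xs) := by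
  rw [List.perm_ext_iff_of_nodup (pv_nodup_pvOut xs) (pv_nodup_pvRows xs)]
  intro x
  rw [pv_mem_pvOut, pv_mem_pvRows]

-- ===== VERDICT (by name: the statement is the Claim_ definition above) =====
theorem orden_suma_spec : Claim_equal_orden_suma := by
  intro xs _
  unfold Spec_orden_suma
  rw [pv_A_eq, pv_B_eq]
  have hinst : (fun (a b : List (List Int)) => a.decidableLT b)
      = (LinearOrder.toDecidableLT : DecidableLT (List (List Int))) := by
    funext a b
    exact Subsingleton.elim _ _
  rw [hinst]
  exact PySem.List.sorted_rev_eq_of_perm_of_pairwise_gt (pvRows xs) (pvOut xs)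
    (fun x => x) (pv_perm xs) (pv_pairwise_pvOut xs)
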